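-- pv_equiv track=rewrite | github.com/Jabbslad/jungledisk_cli | jungledisk_cli/jungledisk_lister.py | _is_direct_child
-- ===== SOURCE A (Python) =====
-- def _is_direct_child(key: str, prefix: str) -> bool:
--     """Check if a key is a direct child of the prefix (not in a subdirectory).
--
--     Args:
--         key: S3 object key
--         prefix: Current prefix
--
--     Returns:
--         True if the key is a direct child of the prefix
--     """
--     if not key.startswith(prefix):
--         return False
--
--     relative = key[len(prefix):]
--
--     # Count the number of UUID segments after the prefix
--     parts = relative.split('/')
--
--     # For JungleDisk, a direct child would be: uuid/uuid/type/name/...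
--     # We want items where the parent UUID is directly under our prefix
--     uuid_count = 0
--     for part in parts:
--         if len(part) == 32:  # UUID length
--             uuid_count += 1
--         else:
--             break
--
--     # Direct child has exactly 2 UUIDs (parent and item)
--     return uuid_count <= 2
-- ===== SOURCE B (Python) =====
-- def _is_direct_child(key: str, prefix: str) -> bool:
--     """Direct-child check by a bounded closed-form test on the first three
--     segments instead of an iterate-and-count loop: the original count<=2 fails
--     exactly when the first three '/'-segments are all 32 chars long."""
--     if not key.startswith(prefix):
--         return False
--     parts = key[len(prefix):].split('/')
--     return not (len(parts) >= 3
--                 and len(parts[0]) == 32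
--                 and len(parts[1]) == 32
--                 and len(parts[2]) == 32)
-- ===== Notes on version B (the rewrite author's own statement) =====
-- stated objective: simpler
-- what changed: Replaces the iterate-and-count loop over UUID-length segments with a single closed-form boolean test on the first three '/'-segments (count<=2 fails exactly when the first three segments are all length 32).
import Mathlib
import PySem

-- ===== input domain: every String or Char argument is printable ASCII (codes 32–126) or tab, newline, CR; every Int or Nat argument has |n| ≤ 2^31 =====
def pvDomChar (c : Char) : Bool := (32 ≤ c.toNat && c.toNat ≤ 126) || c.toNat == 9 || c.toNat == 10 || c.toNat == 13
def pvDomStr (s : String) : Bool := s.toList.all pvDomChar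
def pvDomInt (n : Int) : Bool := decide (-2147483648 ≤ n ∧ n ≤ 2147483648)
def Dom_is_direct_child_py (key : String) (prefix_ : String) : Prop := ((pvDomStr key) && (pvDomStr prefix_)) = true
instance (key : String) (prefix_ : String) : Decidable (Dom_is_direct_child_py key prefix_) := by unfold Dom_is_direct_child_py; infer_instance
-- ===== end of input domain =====

-- ===== PORT A =====
-- counting loop of A: increments while segments have length 32, breaks at the first other one
def idcCount : List (List Char) → Nat
  | [] => 0
  | p :: rest => if p.length = 32 then idcCount rest + 1 else 0

def is_direct_child_py (key : String) (prefix_ : String) : Bool :=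
  if ¬ PySem.Str.startswith key prefix_ then false
  else
    let relative := PySem.Str.slice key (some ((PySem.Str.len prefix_ : Int))) none
    let parts := PySem.Chars.splitOn relative.toList "/".toList
    decide (idcCount parts ≤ 2)

-- ===== PORT B =====
-- B: closed-form check on the first three segments; no counting loop
def is_direct_child_py_alt (key : String) (prefix_ : String) : Bool :=
  if ¬ PySem.Str.startswith key prefix_ then false
  else
    match PySem.Chars.splitOn (PySem.Str.slice key (some ((PySem.Str.len prefix_ : Int))) none).toList "/".toList with
    | a :: b :: c :: _ => !(a.length == 32 && b.length == 32 && c.length == 32)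
    | _ => true

-- ===== PRECONDITION & SPEC =====
def Spec_is_direct_child_py (key : String) (prefix_ : String) (out : Bool) : Prop := out = is_direct_child_py_alt key prefix_
instance (key : String) (prefix_ : String) (out : Bool) : Decidable (Spec_is_direct_child_py key prefix_ out) := by unfold Spec_is_direct_child_py; infer_instance

-- ===== CLAIM (what is proved, stated in full; the proofs are below) =====
def Claim_equal_is_direct_child_py : Prop := ∀ (key : String) (prefix_ : String), Dom_is_direct_child_py key prefix_ → Spec_is_direct_child_py key prefix_ (is_direct_child_py key prefix_)

-- ===== LEMMAS AND PROOFS =====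
lemma idc_count_le_two (parts : List (List Char)) :
    decide (idcCount parts ≤ 2) =
      (match parts with
        | a :: b :: c :: _ => !(a.length == 32 && b.length == 32 && c.length == 32)
        | _ => true) := by
  match parts with
  | [] => simp [idcCount]
  | [a] => simp [idcCount]; split_ifs <;> simp
  | [a, b] => simp [idcCount]; split_ifs <;> simp
  | a :: b :: c :: t =>
    simp only [idcCount]
    split_ifs with ha hb hc <;> simp_all

-- ===== VERDICT (by name: the statement is the Claim_ definition above) =====
theorem is_direct_child_py_spec : Claim_equal_is_direct_child_py := by
  intro key prefix_ _
  unfold Spec_is_direct_child_py is_direct_child_py is_direct_child_py_alt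
  by_cases h : PySem.Str.startswith key prefix_
  · simp only [h, not_true_eq_false, if_false]
    exact idc_count_le_two _
  · rw [if_pos h, if_pos h]
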